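-- pv_equiv track=rewrite | github.com/jwiegert/exwings-codes | create_r3d_functions.py | find_zeroelements
-- ===== SOURCE A (Python) =====
-- def find_zeroelements(
--         inputlist:list,
--     ):
--     """
--     Searches for sequences of zeros and returns a list of lists where
--     each list contains elements of sequences of zeros.
--
--     ARGUMENTS
--       inputlist: list: list or array to search through
--     """
--
--     # Declare lists to fill
--     hole_lists = []
--     hole_list = []
--
--     for nn,number in enumerate(inputlist):
--
--         # Save zeros
--         if number == 0:
--             hole_list.append(nn)
--
--         # Save list when 0s ends and reset list
--         if number != 0 and inputlist[nn-1] == 0 and len(hole_list) > 0: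
--             hole_lists.append(hole_list)
--             hole_list = []
--
--         # Save list if 0s continue to end of array
--         if nn == len(inputlist)-1 and number == 0 and len(hole_list) > 0:
--             hole_lists.append(hole_list)
--
--     return hole_lists
-- ===== SOURCE B (Python) =====
-- def find_zeroelements(
--         inputlist:list,
--     ):
--     """Two-pass version: collect all zero indices, then split them into
--     maximal runs of consecutive integers."""
--     zeros = [i for i, x in enumerate(inputlist) if x == 0]
--     groups = []
--     current = []
--     for i in zeros:
--         if current and i == current[-1] + 1:
--             current.append(i)
--         else:
--             if current:
--                 groups.append(current)
--             current = [i]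
--     if current:
--         groups.append(current)
--     return groups
-- ===== Notes on version B (the rewrite author's own statement) =====
-- stated objective: alternative
-- what changed: A interleaves run-detection with the element scan (peeking at inputlist[nn-1] and the last index inside one loop); B first collects all zero indices in one pass and then partitions that index list into maximal consecutive runs in a second pass.
import Mathlib
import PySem

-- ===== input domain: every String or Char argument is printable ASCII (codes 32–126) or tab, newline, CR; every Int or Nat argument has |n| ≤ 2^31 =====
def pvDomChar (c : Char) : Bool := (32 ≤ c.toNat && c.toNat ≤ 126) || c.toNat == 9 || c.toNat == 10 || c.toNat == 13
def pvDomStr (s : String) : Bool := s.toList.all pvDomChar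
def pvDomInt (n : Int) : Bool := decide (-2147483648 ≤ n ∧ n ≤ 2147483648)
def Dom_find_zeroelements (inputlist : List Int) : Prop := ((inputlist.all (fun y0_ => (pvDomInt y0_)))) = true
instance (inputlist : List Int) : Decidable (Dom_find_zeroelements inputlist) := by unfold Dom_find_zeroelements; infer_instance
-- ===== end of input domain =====

-- B collects the zero indices first and then splits them into consecutive runs;
-- A detects the runs inside the single element scan. Same return value everywhere.

-- ===== PORT A =====
-- loop body of A's single for-loop (state = (hole_lists, hole_list))
def stepA (inputlist : List Int) (st : List (List Int) × List Int) (p : Int × Int) :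
    List (List Int) × List Int :=
  let nn := p.1
  let number := p.2
  -- if number == 0: hole_list.append(nn)
  let hole_list := if number = 0 then st.2 ++ [nn] else st.2
  -- if number != 0 and inputlist[nn-1] == 0 and len(hole_list) > 0: flush & reset
  let st2 : List (List Int) × List Int :=
    if number ≠ 0 ∧ PySem.List.pyGet? inputlist (nn - 1) = some 0 ∧ hole_list.length > 0 then
      (st.1 ++ [hole_list], [])
    else (st.1, hole_list)
  -- if nn == len(inputlist)-1 and number == 0 and len(hole_list) > 0: flush (no reset)
  if nn = (inputlist.length : Int) - 1 ∧ number = 0 ∧ st2.2.length > 0 then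
    (st2.1 ++ [st2.2], st2.2)
  else st2

def find_zeroelements (inputlist : List Int) : List (List Int) :=
  (List.foldl (stepA inputlist) ([], []) (PySem.List.enumerate inputlist)).1

-- ===== PORT B =====
-- loop body of B's second pass (state = (groups, current)); current[-1] is getLast?
def stepB (st : List (List Int) × List Int) (i : Int) : List (List Int) × List Int :=
  match st.2.getLast? with
  | some last =>
      if i = last + 1 then (st.1, st.2 ++ [i])
      else (st.1 ++ [st.2], [i])
  | none => (st.1, [i])

def find_zeroelements_alt (inputlist : List Int) : List (List Int) :=
  let zeros := ((PySem.List.enumerate inputlist).filter (fun p => p.2 == 0)).map (·.1)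
  let r := List.foldl stepB ([], []) zeros
  if r.2.isEmpty then r.1 else r.1 ++ [r.2]

-- ===== PRECONDITION & SPEC =====
def Spec_find_zeroelements (inputlist : List Int) (out : List (List Int)) : Prop := out = find_zeroelements_alt inputlist
instance (inputlist : List Int) (out : List (List Int)) : Decidable (Spec_find_zeroelements inputlist out) := by unfold Spec_find_zeroelements; infer_instance

-- ===== CLAIM (what is proved, stated in full; the proofs are below) =====
def Claim_equal_find_zeroelements : Prop := ∀ (inputlist : List Int), Dom_find_zeroelements inputlist → Spec_find_zeroelements inputlist (find_zeroelements inputlist)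

-- ===== LEMMAS AND PROOFS =====

-- the zero-index list of the suffix starting at position n
def zerosOf (n : Int) : List Int → List Int
  | [] => []
  | x :: xs => if x = 0 then n :: zerosOf (n + 1) xs else zerosOf (n + 1) xs

lemma zeros_eq (xs : List Int) : ∀ n : Int,
    ((PySem.List.enumerate xs n).filter (fun p => p.2 == 0)).map (·.1) = zerosOf n xs := by
  induction xs with
  | nil => intro n; simp [zerosOf, PySem.List.enumerate_nil]
  | cons x xs ih =>
      intro n
      rw [PySem.List.enumerate_cons]
      by_cases hx : x = 0 <;> simp [zerosOf, hx, ih]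

lemma pyGet?_mid (pre : List Int) (x : Int) (s : List Int) :
    PySem.List.pyGet? (pre ++ x :: s) ((pre.length : Int)) = some x := by
  rw [PySem.List.pyGet?_natCast]
  simp

-- relation between the two loop states while scanning the suffix s at position pre.length
def RelAB (L pre : List Int) (s : List Int) (a b : List (List Int) × List Int) : Prop :=
  (a.1 = b.1 ∧ a.2 = b.2 ∧
    (a.2 ≠ [] → s ≠ [] ∧ PySem.List.pyGet? L ((pre.length : Int) - 1) = some 0 ∧
      a.2.getLast? = some ((pre.length : Int) - 1)))
  ∨ (a.2 = [] ∧ a.1 = b.1 ++ [b.2] ∧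
      ∃ m, b.2.getLast? = some m ∧ m ≤ (pre.length : Int) - 2)

lemma main (L : List Int) : ∀ (s pre : List Int) (a b : List (List Int) × List Int),
    L = pre ++ s → RelAB L pre s a b →
    (List.foldl (stepA L) a (PySem.List.enumerate s (pre.length : Int))).1
      = (let r := List.foldl stepB b (zerosOf (pre.length : Int) s);
         if r.2.isEmpty then r.1 else r.1 ++ [r.2]) := by
  intro s
  induction s with
  | nil =>
      intro pre a b hL hR
      obtain ⟨a1, a2⟩ := a
      obtain ⟨b1, b2⟩ := b
      dsimp only [RelAB] at hR
      simp only [PySem.List.enumerate_nil, zerosOf, List.foldl_nil]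
      rcases hR with ⟨h1, h2, h3⟩ | ⟨h1, h2, m, hm, _⟩
      · have ha : a2 = [] := by
          by_contra h
          exact (h3 h).1 rfl
        have hb : b2 = [] := h2 ▸ ha
        simp [hb, h1]
      · have hb : b2 ≠ [] := by
          intro h; simp [h] at hm
        simp [List.isEmpty_iff, hb, h2]
  | cons x xs ih =>
      intro pre a b hL hR
      obtain ⟨a1, a2⟩ := a
      obtain ⟨b1, b2⟩ := b
      dsimp only [RelAB] at hR
      have hlen : (L.length : Int) = (pre.length : Int) + 1 + (xs.length : Int) := by
        subst hL; simp; omega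
      have hget : PySem.List.pyGet? L ((pre.length : Int)) = some x := by
        subst hL; exact pyGet?_mid pre x xs
      have hpre' : L = (pre ++ [x]) ++ xs := by simp [hL]
      have hlen' : ((pre ++ [x]).length : Int) = (pre.length : Int) + 1 := by simp
      rw [PySem.List.enumerate_cons, List.foldl_cons]
      by_cases hx : x = 0
      · -- x = 0 : A appends pre.length to cur (and flushes if last); B's zeros gains pre.length
        subst hx
        simp only [zerosOf]
        by_cases hxs : xs = []
        · -- last element: A flushes inside the loop, B flushes after it
          subst hxs
          simp only [PySem.List.enumerate_nil, zerosOf, List.foldl_nil]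
          have hlast : (pre.length : Int) = (L.length : Int) - 1 := by
            simp only [List.length_nil, Nat.cast_zero] at hlen; omega
          rcases hR with ⟨h1, h2, h3⟩ | ⟨h1, h2, m, hm, hm2⟩
          · by_cases ha : a2 = []
            · have hb : b2 = [] := h2 ▸ ha
              simp [stepA, stepB, ha, hb, ← hlast, h1]
            · obtain ⟨-, -, hlastc⟩ := h3 ha
              have hb : b2.getLast? = some ((pre.length : Int) - 1) := h2 ▸ hlastc
              simp [stepA, stepB, ← hlast, h1, h2, hb]
          · -- stale B group: its last index is ≤ pre.length - 2, so the new run starts fresh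
            have hne : (pre.length : Int) ≠ m + 1 := by omega
            simp [stepA, stepB, h1, h2, hm, hne, ← hlast]
        · -- not the last element
          have hnotlast : (pre.length : Int) ≠ (L.length : Int) - 1 := by
            have : xs.length ≠ 0 := by simpa using hxs
            omega
          rcases hR with ⟨h1, h2, h3⟩ | ⟨h1, h2, m, hm, hm2⟩
          · by_cases ha : a2 = []
            · have hb : b2 = [] := h2 ▸ ha
              have := ih (pre ++ [(0:Int)]) (a1, a2 ++ [(pre.length : Int)])
                (b1, b2 ++ [(pre.length : Int)]) hpre'
                (Or.inl ⟨h1, by rw [h2], by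
                  intro _
                  refine ⟨hxs, ?_, ?_⟩
                  · rw [hlen']; simpa using hget
                  · rw [hlen']; simp [ha]⟩)
              rw [hlen'] at this
              simp only [stepA, ha, hb] at *
              simpa [stepA, stepB, ha, hb, hnotlast] using this
            · obtain ⟨-, -, hlastc⟩ := h3 ha
              have hb : b2.getLast? = some ((pre.length : Int) - 1) := h2 ▸ hlastc
              have := ih (pre ++ [(0:Int)]) (a1, a2 ++ [(pre.length : Int)])
                (b1, b2 ++ [(pre.length : Int)]) hpre'
                (Or.inl ⟨h1, by rw [h2], by
                  intro _
                  refine ⟨hxs, ?_, ?_⟩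
                  · rw [hlen']; simpa using hget
                  · rw [hlen']; simp⟩)
              rw [hlen'] at this
              simpa [stepA, stepB, hnotlast, hb, h2] using this
          · have hne : (pre.length : Int) ≠ m + 1 := by omega
            have := ih (pre ++ [(0:Int)]) (a1, [(pre.length : Int)])
              (b1 ++ [b2], [(pre.length : Int)]) hpre'
              (Or.inl ⟨h2, rfl, by
                intro _
                refine ⟨hxs, ?_, ?_⟩
                · rw [hlen']; simpa using hget
                · rw [hlen']; simp⟩)
            rw [hlen'] at this
            simpa [stepA, stepB, h1, hm, hne, hnotlast] using this
      · -- x ≠ 0 : B's zeros unchanged; A flushes cur if nonempty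
        simp only [zerosOf, if_neg hx]
        rcases hR with ⟨h1, h2, h3⟩ | ⟨h1, h2, m, hm, hm2⟩
        · by_cases ha : a2 = []
          · have hb : b2 = [] := h2 ▸ ha
            have := ih (pre ++ [x]) (a1, a2) (b1, b2) hpre'
              (Or.inl ⟨h1, h2, by intro h; exact absurd ha h⟩)
            rw [hlen'] at this
            simpa [stepA, ha, hx] using this
          · obtain ⟨-, hget0, hlastc⟩ := h3 ha
            have := ih (pre ++ [x]) (a1 ++ [a2], ([] : List Int)) (b1, b2) hpre' ?_
            · rw [hlen'] at this
              simpa [stepA, hx, ha, hget0, List.length_pos_iff] using this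
            · refine Or.inr ⟨rfl, by rw [h1, h2], (pre.length : Int) - 1, ?_, by omega⟩
              rw [← h2]; exact hlastc
        · have := ih (pre ++ [x]) (a1, a2) (b1, b2) hpre'
            (Or.inr ⟨h1, h2, m, hm, by push_cast at *; omega⟩)
          rw [hlen'] at this
          simpa [stepA, hx, h1] using this

-- ===== VERDICT (by name: the statement is the Claim_ definition above) =====
theorem find_zeroelements_spec : Claim_equal_find_zeroelements := by
  intro L _
  unfold Spec_find_zeroelements find_zeroelements find_zeroelements_alt
  rw [zeros_eq]
  have := main L L [] ([], []) ([], []) (by simp)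
    (Or.inl ⟨rfl, rfl, by intro h; exact absurd rfl h⟩)
  simpa using this
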